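-- pv_equiv track=rewrite | github.com/Cyamos2/ChronoCiv | Tools/generate_sprites.py | generate_building_sprite
-- ===== SOURCE A (Python) =====
-- def generate_building_sprite(building_type, size=(32, 32)):
--     """Generate building sprite template."""
--     width, height = size
--     pixels = []
--
--     for y in range(height):
--         row = []
--         for x in range(width):
--             if y < 4:  # Roof - use terrain color as base
--                 row.append("terrain")
--             elif y < height - 4:  # Walls - use stone/brown
--                 row.append("stone")
--             else:  # Foundation - use dark stone
--                 row.append("#2F2F2F")
--         pixels.append(row)
--
--     return pixels
-- ===== SOURCE B (Python) =====
-- def generate_building_sprite(building_type, size=(32, 32)):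
--     """Generate building sprite template (band arithmetic instead of a per-cell loop)."""
--     width, height = size
--     w = max(width, 0)
--     h = max(height, 0)
--     roof = min(h, 4)
--     wall = max(h - 8, 0)
--     found = h - roof - wall
--     return ([["terrain"] * w for _ in range(roof)]
--             + [["stone"] * w for _ in range(wall)]
--             + [["#2F2F2F"] * w for _ in range(found)])
-- ===== Notes on version B (the rewrite author's own statement) =====
-- stated objective: alternative
-- what changed: Replaces the per-cell double loop with closed-form band sizes (roof=min(h,4), wall=max(h-8,0), foundation=rest) and builds the grid by concatenating three bands of replicated rows.
import Mathlib
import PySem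

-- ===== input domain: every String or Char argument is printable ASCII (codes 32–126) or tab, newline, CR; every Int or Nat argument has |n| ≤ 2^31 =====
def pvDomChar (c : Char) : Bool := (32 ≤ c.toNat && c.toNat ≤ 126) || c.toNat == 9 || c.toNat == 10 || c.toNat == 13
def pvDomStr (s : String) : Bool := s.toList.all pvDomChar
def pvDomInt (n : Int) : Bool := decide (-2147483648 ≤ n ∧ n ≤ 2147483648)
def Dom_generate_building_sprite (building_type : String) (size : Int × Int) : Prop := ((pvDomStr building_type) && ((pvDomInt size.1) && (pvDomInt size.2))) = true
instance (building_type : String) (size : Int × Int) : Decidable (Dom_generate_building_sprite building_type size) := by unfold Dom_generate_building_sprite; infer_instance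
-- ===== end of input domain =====

-- ===== PORT A =====
-- B replaces A's per-cell double loop with closed-form band sizes and three bands of replicated rows (objective: alternative decomposition).
def generate_building_sprite (building_type : String) (size : Int × Int) : List (List String) :=
  let width := size.1
  let height := size.2
  (PySem.List.pyRange 0 height 1).foldl (fun pixels y =>
    pixels ++ [(PySem.List.pyRange 0 width 1).foldl (fun row _x =>
      row ++ [if y < 4 then "terrain"
              else if y < height - 4 then "stone"
              else "#2F2F2F"]) []]) []

-- ===== PORT B =====
def generate_building_sprite_alt (building_type : String) (size : Int × Int) : List (List String) :=
  let width := size.1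
  let height := size.2
  let w := max width 0
  let h := max height 0
  let roof := min h 4
  let wall := max (h - 8) 0
  let found := h - roof - wall
  List.replicate roof.toNat (List.replicate w.toNat "terrain")
    ++ List.replicate wall.toNat (List.replicate w.toNat "stone")
    ++ List.replicate found.toNat (List.replicate w.toNat "#2F2F2F")

-- ===== PRECONDITION & SPEC =====
def Spec_generate_building_sprite (building_type : String) (size : Int × Int) (out : List (List String)) : Prop := out = generate_building_sprite_alt building_type size
instance (building_type : String) (size : Int × Int) (out : List (List String)) : Decidable (Spec_generate_building_sprite building_type size out) := by unfold Spec_generate_building_sprite; infer_instance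

-- ===== CLAIM (what is proved, stated in full; the proofs are below) =====
def Claim_equal_generate_building_sprite : Prop := ∀ (building_type : String) (size : Int × Int), Dom_generate_building_sprite building_type size → Spec_generate_building_sprite building_type size (generate_building_sprite building_type size)

-- ===== LEMMAS AND PROOFS =====
lemma pv_bands (W : Nat) (H : Int) :
    (List.range H.toNat).map (fun (k : Nat) => List.replicate W
      (if (k : Int) < 4 then "terrain" else if (k : Int) < H - 4 then "stone" else "#2F2F2F"))
    = List.replicate (min (max H 0) 4).toNat (List.replicate W "terrain")
      ++ List.replicate (max (max H 0 - 8) 0).toNat (List.replicate W "stone")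
      ++ List.replicate (max H 0 - min (max H 0) 4 - max (max H 0 - 8) 0).toNat
          (List.replicate W "#2F2F2F") := by
  apply List.ext_getElem
  · simp; omega
  · intro i h1 h2
    simp only [List.length_map, List.length_range] at h1
    have hi : (i : Int) < H := by omega
    simp only [List.getElem_map, List.getElem_range]
    by_cases hr : (i : Int) < 4
    · rw [List.getElem_append_left (by simp; omega), List.getElem_append_left (by simp; omega)]
      simp [hr]
    · by_cases hw : (i : Int) < H - 4
      · rw [List.getElem_append_left (by simp; omega), List.getElem_append_right (by simp; omega)]
        simp [hr, hw]
      · rw [List.getElem_append_right (by simp; omega)]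
        simp [hr, hw]

-- ===== VERDICT (by name: the statement is the Claim_ definition above) =====
theorem generate_building_sprite_spec : Claim_equal_generate_building_sprite := by
  intro bt size _
  unfold Spec_generate_building_sprite generate_building_sprite generate_building_sprite_alt
  simp only [PySem.List.foldl_append_singleton_eq_map, List.nil_append, List.map_const',
    List.length_map, List.length_range, zero_add, Int.sub_zero, PySem.List.pyRange_one (a := 0)]
  rw [List.map_map]
  have hW : (max size.1 0).toNat = size.1.toNat := by omega
  rw [hW]
  simp only [Function.comp_def]
  exact pv_bands size.1.toNat size.2
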